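-- pv_equiv track=rewrite | github.com/YN1CK/PasswordManager | Scramp.py | scramble
-- ===== SOURCE A (Python) =====
-- def scramble(clearText, seed = "15312135"):
--     result = ""
--     if len(seed) <= len(clearText):
--         while len(seed) <= len(clearText):
--             seed += seed
--     for i in range(0, len(clearText)):
--         temp = ord(clearText[i])
--         temp += int(seed[i])
--         result += chr(temp)
--     return result
-- ===== SOURCE B (Python) =====
-- def scramble(clearText, seed="15312135"):
--     # Block decomposition: encode one seed-length block at a time via zip(rest, seed),
--     # slicing off the consumed block; no seed doubling, no index arithmetic.
--     parts = []
--     rest = clearText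
--     while rest:
--         parts.append("".join(chr(ord(c) + int(d)) for c, d in zip(rest, seed)))
--         rest = rest[len(seed):]
--     return "".join(parts)
-- ===== Notes on version B (the rewrite author's own statement) =====
-- stated objective: alternative
-- what changed: Replaces A's seed-doubling phase plus single indexed character loop by a block decomposition: a while loop that encodes one seed-length block at a time with zip(rest, seed) and slices the consumed block off, collecting blocks into a list joined once; no seed extension and no index arithmetic.
import Mathlib
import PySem

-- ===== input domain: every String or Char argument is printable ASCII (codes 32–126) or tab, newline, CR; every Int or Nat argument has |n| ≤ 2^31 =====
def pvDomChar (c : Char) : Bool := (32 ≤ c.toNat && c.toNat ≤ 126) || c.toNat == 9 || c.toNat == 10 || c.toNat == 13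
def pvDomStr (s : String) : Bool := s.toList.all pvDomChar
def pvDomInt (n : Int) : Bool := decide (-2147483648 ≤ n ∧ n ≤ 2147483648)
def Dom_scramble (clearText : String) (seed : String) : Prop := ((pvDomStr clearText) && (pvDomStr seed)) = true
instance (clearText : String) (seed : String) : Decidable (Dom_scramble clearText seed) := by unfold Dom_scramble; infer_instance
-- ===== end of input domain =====

-- B replaces A's seed-doubling loop and per-index loop by a block decomposition (encode one
-- seed-length block with zip, slice it off, join the blocks); equivalence proved on Pre_.


-- ===== PORT A =====
-- the `while len(seed) <= len(clearText): seed += seed` loop; fuel n+1 is enough for a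
-- nonempty seed (length at least doubles each step); Pre_ excludes the empty seed, on
-- which the Python loop never terminates.
def doubleSeed (fuel : Nat) (s : List Char) (n : Nat) : List Char :=
  match fuel with
  | 0 => s
  | fuel + 1 => if s.length ≤ n then doubleSeed fuel (s ++ s) n else s

-- int(seed[i]) for a single character: exact for digit characters '0'..'9';
-- Pre_ restricts the used seed characters to digits (Python raises ValueError otherwise).
def scramble (clearText : String) (seed : String) : String :=
  let ct := clearText.toList
  let s := if seed.toList.length ≤ ct.length
           then doubleSeed (ct.length + 1) seed.toList ct.length
           else seed.toList
  String.mk ((List.range ct.length).foldl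
    (fun result i => result ++ [Char.ofNat ((ct.getD i ' ').toNat + ((s.getD i ' ').toNat - 48))]) [])

-- ===== PORT B =====
-- the `while rest:` loop of Source B; rest shrinks by seed-length each turn (`rest = rest[len(seed):]`
-- is `List.drop`), so for a nonempty seed fuel = |clearText| turns suffice; the fuel only
-- makes the recursion total (on an empty seed with nonempty text the Python loop hangs —
-- excluded by Pre_).
def altBlocks (fuel : Nat) (rest : List Char) (s : List Char) : List (List Char) :=
  match fuel with
  | 0 => []
  | fuel + 1 =>
    if rest = [] then []
    else ((List.zip rest s).map (fun cd => Char.ofNat (cd.1.toNat + (cd.2.toNat - 48))))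
         :: altBlocks fuel (rest.drop s.length) s

def scramble_alt (clearText : String) (seed : String) : String :=
  let ct := clearText.toList
  String.mk (altBlocks ct.length ct seed.toList).flatten

-- ===== PRECONDITION & SPEC =====
-- Pre_ excludes an empty seed together with nonempty clearText (both Pythons then loop
-- forever), the empty seed with empty clearText (A alone loops forever there), and inputs
-- where a USED seed character seed[i % len(seed)], i < len(clearText), is not a digit
-- (both Pythons raise ValueError on int() of it).
def Pre_scramble (clearText : String) (seed : String) : Prop :=
  seed.toList ≠ [] ∧
  (List.range clearText.toList.length).all
    (fun i => (seed.toList.getD (i % seed.toList.length) ' ').isDigit) = true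
instance (clearText : String) (seed : String) : Decidable (Pre_scramble clearText seed) := by
  unfold Pre_scramble; infer_instance

def pvWitness_scramble : String × String := ("hello world", "15312135")

def Spec_scramble (clearText : String) (seed : String) (out : String) : Prop := out = scramble_alt clearText seed
instance (clearText : String) (seed : String) (out : String) : Decidable (Spec_scramble clearText seed out) := by unfold Spec_scramble; infer_instance

-- ===== CLAIM (what is proved, stated in full; the proofs are below) =====
def Claim_equal_scramble : Prop := ∀ (clearText : String) (seed : String), Dom_scramble clearText seed → Pre_scramble clearText seed → Spec_scramble clearText seed (scramble clearText seed)

-- ===== LEMMAS AND PROOFS =====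

-- canonical value: shift char i by the digit at i % |seed|
def canon (ct s : List Char) : List Char :=
  (List.range ct.length).map
    (fun i => Char.ofNat ((ct.getD i ' ').toNat + ((s.getD (i % s.length) ' ').toNat - 48)))

-- the doubled seed is a periodic extension of the original one
structure PerExt (s : List Char) (t : List Char) : Prop where
  dvd : s.length ∣ t.length
  per : ∀ i : Nat, i < t.length → t.getD i ' ' = s.getD (i % s.length) ' '

theorem perExt_self (s : List Char) : PerExt s s := by
  refine ⟨dvd_refl _, fun i hi => ?_⟩
  rw [Nat.mod_eq_of_lt hi]

theorem perExt_append (s t : List Char) (h : PerExt s t) : PerExt s (t ++ t) := by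
  refine ⟨by simpa using Dvd.dvd.add h.dvd h.dvd, fun i hi => ?_⟩
  simp only [List.length_append] at hi
  by_cases hlt : i < t.length
  · rw [List.getD_append _ _ _ _ hlt, h.per i hlt]
  · push_neg at hlt
    have h2 : i - t.length < t.length := by omega
    rw [List.getD_append_right _ _ _ _ hlt, h.per _ h2]
    congr 1
    obtain ⟨k, hk⟩ := h.dvd
    have : i % s.length = (i - t.length + t.length) % s.length := by rw [Nat.sub_add_cancel hlt]
    rw [this, hk, Nat.add_mul_mod_self_left]

theorem doubleSeed_perExt (fuel : Nat) (s t : List Char) (n : Nat) (h : PerExt s t) :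
    PerExt s (doubleSeed fuel t n) := by
  induction fuel generalizing t with
  | zero => exact h
  | succ fuel ih =>
    unfold doubleSeed
    split
    · exact ih _ (perExt_append s t h)
    · exact h

theorem doubleSeed_long (fuel : Nat) (t : List Char) (n : Nat)
    (h1 : 1 ≤ t.length) (h2 : n + 1 ≤ fuel + t.length) :
    n < (doubleSeed fuel t n).length := by
  induction fuel generalizing t with
  | zero => unfold doubleSeed; omega
  | succ fuel ih =>
    unfold doubleSeed
    split
    · exact ih (t ++ t) (by simp; omega) (by simp; omega)
    · omega

theorem foldl_append_map {α β : Type} (f : α → β) (l : List α) (acc : List β) :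
    l.foldl (fun r a => r ++ [f a]) acc = acc ++ l.map f := by
  induction l generalizing acc with
  | nil => simp
  | cons a l ih => simp [List.foldl, ih]

-- A computes the canonical value
theorem scramble_eq_canon (clearText seed : String) (hne : seed.toList ≠ []) :
    scramble clearText seed = String.mk (canon clearText.toList seed.toList) := by
  unfold scramble canon
  set ct := clearText.toList with hct
  set s0 := seed.toList with hs0
  have hn1 : 1 ≤ s0.length := by
    have := List.length_pos_iff.mpr hne; omega
  set s : List Char := if s0.length ≤ ct.length then doubleSeed (ct.length + 1) s0 ct.length else s0 with hs
  have hper : PerExt s0 s := by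
    rw [hs]; split
    · exact doubleSeed_perExt _ _ _ _ (perExt_self s0)
    · exact perExt_self s0
  have hlong : ct.length ≤ s.length := by
    rw [hs]; split
    · have := doubleSeed_long (ct.length + 1) s0 ct.length hn1 (by omega); omega
    · omega
  simp only []
  congr 1
  rw [foldl_append_map, List.nil_append]
  apply List.map_congr_left
  intro i hi
  rw [List.mem_range] at hi
  rw [hper.per i (by omega)]

-- B computes the canonical value
theorem altBlocks_eq_canon (fuel : Nat) (rest s : List Char)
    (hn : 1 ≤ s.length) (hf : rest.length ≤ fuel) :
    (altBlocks fuel rest s).flatten = canon rest s := by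
  induction fuel generalizing rest with
  | zero =>
    have : rest = [] := by
      cases rest with
      | nil => rfl
      | cons a l => simp at hf
    subst this; simp [altBlocks, canon]
  | succ fuel ih =>
    unfold altBlocks
    by_cases hr : rest = []
    · subst hr; simp [canon]
    · simp only [if_neg hr, List.flatten_cons]
      have hrp : 1 ≤ rest.length := by
        cases rest with
        | nil => exact absurd rfl hr
        | cons a l => simp
      rw [ih (rest.drop s.length) (by simp; omega)]
      by_cases hbig : s.length < rest.length
      · -- a full block, then the rest recursively
        unfold canon
        rw [show (rest.drop s.length).length = rest.length - s.length from by simp]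
        conv_rhs => rw [show rest.length = s.length + (rest.length - s.length) from by omega,
                        List.range_add, List.map_append]
        congr 1
        · apply List.ext_getElem
          · simp; omega
          · intro i h1 h2
            have his : i < s.length := by simp at h1; omega
            have hilt : i < rest.length := by omega
            simp only [List.getElem_map, List.getElem_range, List.getElem_zip]
            rw [Nat.mod_eq_of_lt his, List.getD_eq_getElem rest ' ' hilt,
                List.getD_eq_getElem s ' ' his]
        · rw [List.map_map]
          apply List.map_congr_left
          intro i hi
          rw [List.mem_range] at hi
          have h1 : s.length + i < rest.length := by omega
          simp only [Function.comp]
          congr 1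
          rw [List.getD_eq_getElem _ ' ' (by simp; omega),
              List.getD_eq_getElem _ ' ' h1]
          simp [List.getElem_drop]
      · -- the final short block: everything is consumed here
        have hd0 : rest.drop s.length = [] := List.drop_eq_nil_of_le (by omega)
        rw [hd0, show canon [] s = [] from by simp [canon], List.append_nil]
        unfold canon
        apply List.ext_getElem
        · simp; omega
        · intro i h1 h2
          have hilt : i < rest.length := by simp at h1; omega
          have his : i < s.length := by omega
          simp only [List.getElem_map, List.getElem_range, List.getElem_zip]
          rw [Nat.mod_eq_of_lt his, List.getD_eq_getElem rest ' ' hilt,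
              List.getD_eq_getElem s ' ' his]

-- ===== VERDICT (by name: the statement is the Claim_ definition above) =====
theorem scramble_spec : Claim_equal_scramble := by
  intro clearText seed _ hpre
  obtain ⟨hne, _⟩ := hpre
  show scramble clearText seed = scramble_alt clearText seed
  have hn1 : 1 ≤ seed.toList.length := by
    have := List.length_pos_iff.mpr hne; omega
  rw [scramble_eq_canon clearText seed hne]
  rw [← altBlocks_eq_canon clearText.toList.length clearText.toList seed.toList hn1 (le_refl _)]
  rfl
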